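-- pv_equiv track=rewrite | github.com/muskanlaul99/Gduns-name-match | ongoing_mna.py | city_change
-- ===== SOURCE A (Python) =====
-- def city_change(sen):
--     words = {'saint':'st',
--             'nyc':'newyork',
--             'ny':'newyork',
--             'mount':'mt'}
--     for word in words:
--         if word in sen:
--             sen=sen.replace(word,words[word])
--     return sen
-- ===== SOURCE B (Python) =====
-- def city_change(sen):
--     # one left-to-right pass instead of four independent full-string replace scans
--     words = [('saint', 'st'), ('nyc', 'newyork'), ('ny', 'newyork'), ('mount', 'mt')]
--     out = []
--     i = 0
--     n = len(sen)
--     while i < n: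
--         for key, val in words:
--             if sen.startswith(key, i):
--                 out.append(val)
--                 i += len(key)
--                 break
--         else:
--             out.append(sen[i])
--             i += 1
--     return ''.join(out)
-- ===== Notes on version B (the rewrite author's own statement) =====
-- stated objective: alternative
-- what changed: A performs four sequential full-string str.replace passes (one per abbreviation); B builds the result in a single left-to-right scan that at each position tries the four keys in priority order (nyc before ny) and otherwise copies one character.
import Mathlib
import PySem

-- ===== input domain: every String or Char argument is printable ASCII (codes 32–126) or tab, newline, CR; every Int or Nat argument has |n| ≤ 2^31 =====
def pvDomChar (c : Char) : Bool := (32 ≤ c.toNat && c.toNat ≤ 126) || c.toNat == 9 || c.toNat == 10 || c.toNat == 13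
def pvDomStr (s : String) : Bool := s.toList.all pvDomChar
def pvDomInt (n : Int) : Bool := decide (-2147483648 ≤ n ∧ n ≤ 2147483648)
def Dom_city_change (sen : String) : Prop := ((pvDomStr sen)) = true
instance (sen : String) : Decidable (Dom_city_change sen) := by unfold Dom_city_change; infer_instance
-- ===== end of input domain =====

-- B replaces A's four sequential full-string `str.replace` passes by ONE left-to-right scan
-- that tries the four abbreviations at each position (nyc before ny); same return value.

-- ===== PORT A =====
def city_change (sen : String) : String :=
  let words : PySem.Dict String String :=
    PySem.Dict.ofList [("saint", "st"), ("nyc", "newyork"), ("ny", "newyork"), ("mount", "mt")]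
  -- for word in words: if word in sen: sen = sen.replace(word, words[word])
  -- (words[word] can never raise here: word ranges over the dict's own keys, so get? is always some)
  words.keys.foldl
    (fun s word =>
      if PySem.Str.isIn word s then PySem.Str.replace s word ((words.get? word).getD "") else s)
    sen

-- ===== PORT B =====
-- the while/for-break loop of Source B: at each position try the four keys in order, else copy one char
def scanB : List Char → List Char
  | [] => []
  | c :: t =>
    if PySem.Chars.startswith (c :: t) ['s','a','i','n','t'] then
      ['s','t'] ++ scanB (t.drop 4)
    else if PySem.Chars.startswith (c :: t) ['n','y','c'] then
      ['n','e','w','y','o','r','k'] ++ scanB (t.drop 2)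
    else if PySem.Chars.startswith (c :: t) ['n','y'] then
      ['n','e','w','y','o','r','k'] ++ scanB (t.drop 1)
    else if PySem.Chars.startswith (c :: t) ['m','o','u','n','t'] then
      ['m','t'] ++ scanB (t.drop 4)
    else c :: scanB t
termination_by l => l.length
decreasing_by all_goals simp [List.length_drop]

def city_change_alt (sen : String) : String := String.ofList (scanB sen.toList)

-- ===== PRECONDITION & SPEC =====
def Spec_city_change (sen : String) (out : String) : Prop := out = city_change_alt sen
instance (sen : String) (out : String) : Decidable (Spec_city_change sen out) := by unfold Spec_city_change; infer_instance

-- ===== CLAIM (what is proved, stated in full; the proofs are below) =====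
def Claim_equal_city_change : Prop := ∀ (sen : String), Dom_city_change sen → Spec_city_change sen (city_change sen)

-- ===== LEMMAS AND PROOFS =====

-- str.replace as a plain structural recursion (leftmost, non-overlapping), to reason about Chars.replace.go
def repP (old new : List Char) : List Char → List Char
  | [] => []
  | c :: t =>
    if old.isPrefixOf (c :: t) then new ++ repP old new (t.drop (old.length - 1))
    else c :: repP old new t
termination_by l => l.length
decreasing_by all_goals simp [List.length_drop]

lemma repP_nil (old new : List Char) : repP old new [] = [] := by rw [repP]

lemma repP_cons (old new : List Char) (c : Char) (t : List Char) :
    repP old new (c :: t) =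
      if old.isPrefixOf (c :: t) then new ++ repP old new (t.drop (old.length - 1))
      else c :: repP old new t := by rw [repP]

lemma go_eq_repP (old new : List Char) (hne : old ≠ []) :
    ∀ fuel l acc, l.length ≤ fuel →
      PySem.Chars.replace.go old new fuel l acc = acc.reverse ++ repP old new l := by
  intro fuel
  induction fuel with
  | zero =>
    intro l acc hl
    have : l = [] := List.eq_nil_of_length_eq_zero (Nat.le_zero.mp hl)
    subst this
    simp [PySem.Chars.replace.go, repP]
  | succ n ih =>
    intro l acc hl
    cases l with
    | nil => simp [PySem.Chars.replace.go, repP]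
    | cons c t =>
      rw [PySem.Chars.replace.go]
      rw [repP_cons]
      by_cases hp : old.isPrefixOf (c :: t)
      · simp only [hp, if_true]
        obtain ⟨o, os, rfl⟩ : ∃ o os, old = o :: os := by
          cases old with | nil => exact absurd rfl hne | cons o os => exact ⟨o, os, rfl⟩
        have hlen : ((c :: t).drop (o :: os).length).length ≤ n := by
          simp at hl ⊢; omega
        rw [ih _ _ hlen]
        simp
      · simp only [hp]
        have hlen : t.length ≤ n := by simp at hl; omega
        rw [ih _ _ hlen]
        simp

lemma replace_eq_repP (old new s : List Char) (hne : old ≠ []) :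
    PySem.Chars.replace s old new = repP old new s := by
  rw [PySem.Chars.replace]
  have : old.isEmpty = false := by cases old <;> simp_all
  rw [this]
  simp only [Bool.false_eq_true, if_false]
  rw [go_eq_repP old new hne s.length s [] (le_refl _)]
  simp

lemma repP_of_not_infix (old new s : List Char) (h : ¬ old <:+: s) : repP old new s = s := by
  induction s with
  | nil => simp [repP]
  | cons c t ih =>
    rw [repP_cons]
    have hp : old.isPrefixOf (c :: t) = false := by
      rw [Bool.eq_false_iff]
      intro hpp
      exact h (List.IsPrefix.isInfix (List.isPrefixOf_iff_prefix.mp hpp))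
    rw [hp]
    simp only [Bool.false_eq_true, if_false]
    rw [ih (fun hi => h ((hi.trans (List.suffix_cons c t).isInfix)))]

lemma step_toList (oldS newS : String) (h : oldS.toList ≠ []) (s : String) :
    (if PySem.Str.isIn oldS s then PySem.Str.replace s oldS newS else s).toList
      = repP oldS.toList newS.toList s.toList := by
  by_cases hin : PySem.Str.isIn oldS s
  · simp only [hin, if_true]
    rw [PySem.Str.replace]
    rw [replace_eq_repP _ _ _ h]
    simp
  · simp only [hin, Bool.false_eq_true, if_false]
    have : ¬ oldS.toList <:+: s.toList := by
      rw [← PySem.Chars.isIn_eq_false_iff]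
      simpa [PySem.Str.isIn] using hin
    rw [repP_of_not_infix _ _ _ this]

lemma invRep (old : List Char) (v : Char) (vs : List Char) (c : Char) (hv : v ≠ c) :
    ∀ y z, repP old (v :: vs) y = c :: z →
      ∃ y', y = c :: y' ∧ old.isPrefixOf (c :: y') = false ∧ z = repP old (v :: vs) y' := by
  intro y z h
  cases y with
  | nil => rw [repP_nil] at h; exact absurd h (by simp)
  | cons d t =>
    rw [repP_cons] at h
    by_cases hp : old.isPrefixOf (d :: t)
    · rw [if_pos hp] at h
      simp at h
      exact absurd h.1 hv
    · rw [if_neg hp] at h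
      obtain ⟨rfl, hz⟩ : d = c ∧ z = repP old (v :: vs) t :=
        ⟨(List.cons.inj h).1, (List.cons.inj h).2.symm⟩
      exact ⟨t, rfl, by simp only [Bool.eq_false_iff]; exact hp, hz⟩

lemma repP_pass1 (o : Char) (os new : List Char) (c : Char) (t : List Char) (h : o ≠ c) :
    repP (o :: os) new (c :: t) = c :: repP (o :: os) new t := by
  rw [repP_cons, if_neg (by simp [List.isPrefixOf]; intro hoc; exact absurd hoc h)]

lemma repP_pass2 (o o2 : Char) (os new : List Char) (c c2 : Char) (t : List Char) (h : o2 ≠ c2) :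
    repP (o :: o2 :: os) new (c :: c2 :: t) = c :: repP (o :: o2 :: os) new (c2 :: t) := by
  rw [repP_cons, if_neg (by simp [List.isPrefixOf]; intro _ hoc; exact absurd hoc h)]

lemma repP_pass3 (o o2 o3 : Char) (os new : List Char) (c c2 : Char) (X : List Char)
    (h : X.head? ≠ some o3) :
    repP (o :: o2 :: o3 :: os) new (c :: c2 :: X) = c :: repP (o :: o2 :: o3 :: os) new (c2 :: X) := by
  rw [repP_cons, if_neg]
  cases X with
  | nil => simp [List.isPrefixOf]
  | cons x xs =>
    simp [List.isPrefixOf]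
    intro _ _ hx
    exact absurd hx.symm (by simpa using h)

lemma repP_fire (o : Char) (os new u : List Char) :
    repP (o :: os) new (o :: (os ++ u)) = new ++ repP (o :: os) new u := by
  rw [repP_cons, if_pos (List.isPrefixOf_iff_prefix.mpr ⟨u, by simp⟩)]
  simp

lemma peel1 (c : Char) (h : c ≠ 's') (t z : List Char)
    (hr : repP ['s','a','i','n','t'] ['s','t'] t = c :: z) :
    ∃ t', t = c :: t' ∧ z = repP ['s','a','i','n','t'] ['s','t'] t' := by
  obtain ⟨t', h1, _, h3⟩ := invRep ['s','a','i','n','t'] 's' ['t'] c (fun hh => h hh.symm) t z hr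
  exact ⟨t', h1, h3⟩

lemma peel2 (c : Char) (hn : c ≠ 'n') (hs : c ≠ 's') (t z : List Char)
    (hr : repP ['n','y','c'] ['n','e','w','y','o','r','k']
            (repP ['s','a','i','n','t'] ['s','t'] t) = c :: z) :
    ∃ t', t = c :: t' ∧
      z = repP ['n','y','c'] ['n','e','w','y','o','r','k']
            (repP ['s','a','i','n','t'] ['s','t'] t') := by
  obtain ⟨y1, hy1, _, hz1⟩ :=
    invRep ['n','y','c'] 'n' ['e','w','y','o','r','k'] c (fun hh => hn hh.symm) _ z hr
  obtain ⟨t', ht, hy⟩ := peel1 c hs t y1 hy1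
  exact ⟨t', ht, by rw [hz1, hy]⟩

lemma peel3 (c : Char) (hn : c ≠ 'n') (hs : c ≠ 's') (t z : List Char)
    (hr : repP ['n','y'] ['n','e','w','y','o','r','k']
            (repP ['n','y','c'] ['n','e','w','y','o','r','k']
              (repP ['s','a','i','n','t'] ['s','t'] t)) = c :: z) :
    ∃ t', t = c :: t' ∧
      z = repP ['n','y'] ['n','e','w','y','o','r','k']
            (repP ['n','y','c'] ['n','e','w','y','o','r','k']
              (repP ['s','a','i','n','t'] ['s','t'] t')) := by
  obtain ⟨y1, hy1, _, hz1⟩ :=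
    invRep ['n','y'] 'n' ['e','w','y','o','r','k'] c (fun hh => hn hh.symm) _ z hr
  obtain ⟨t', ht, hy⟩ := peel2 c hn hs t y1 hy1
  exact ⟨t', ht, by rw [hz1, hy]⟩

lemma ount (t w : List Char)
    (h : repP ['n','y'] ['n','e','w','y','o','r','k']
           (repP ['n','y','c'] ['n','e','w','y','o','r','k']
             (repP ['s','a','i','n','t'] ['s','t'] t)) = 'o'::'u'::'n'::'t'::w) :
    ∃ u, t = 'o'::'u'::'n'::'t'::u := by
  obtain ⟨t1, rfl, h1⟩ := peel3 'o' (by decide) (by decide) t _ h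
  obtain ⟨t2, rfl, h2⟩ := peel3 'u' (by decide) (by decide) t1 _ h1.symm
  have E := h2.symm
  by_cases hp3 : ['n','y'].isPrefixOf
      (repP ['n','y','c'] ['n','e','w','y','o','r','k']
        (repP ['s','a','i','n','t'] ['s','t'] t2)) = true
  · obtain ⟨q, hq⟩ := List.isPrefixOf_iff_prefix.mp hp3
    rw [← hq, show (['n','y'] ++ q : List Char) = 'n' :: (['y'] ++ q) from rfl, repP_fire] at E
    simp at E
  · cases hr : repP ['n','y','c'] ['n','e','w','y','o','r','k']
        (repP ['s','a','i','n','t'] ['s','t'] t2) with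
    | nil => rw [hr, repP_nil] at E; simp at E
    | cons d q =>
      rw [hr] at E hp3
      rw [repP_cons, if_neg hp3] at E
      obtain ⟨hd, hE⟩ := List.cons.inj E
      subst hd
      by_cases hp2 : ['n','y','c'].isPrefixOf (repP ['s','a','i','n','t'] ['s','t'] t2) = true
      · obtain ⟨q2, hq2⟩ := List.isPrefixOf_iff_prefix.mp hp2
        rw [← hq2, show (['n','y','c'] ++ q2 : List Char) = 'n' :: (['y','c'] ++ q2) from rfl,
          repP_fire] at hr
        obtain ⟨_, hq⟩ := List.cons.inj hr
        rw [← hq] at hE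
        simp only [List.append_eq, List.cons_append, List.nil_append] at hE
        rw [repP_pass1 _ _ _ _ _ (by decide)] at hE
        simp at hE
      · cases hr1 : repP ['s','a','i','n','t'] ['s','t'] t2 with
        | nil => rw [hr1, repP_nil] at hr; simp at hr
        | cons d2 q2 =>
          rw [hr1] at hr hp2
          rw [repP_cons, if_neg hp2] at hr
          obtain ⟨hd2, hq⟩ := List.cons.inj hr
          subst hd2
          obtain ⟨t3, rfl, hq2e⟩ := peel1 'n' (by decide) t2 q2 hr1
          rw [← hq, hq2e] at hE
          obtain ⟨t4, rfl, _⟩ := peel3 't' (by decide) (by decide) t3 _ hE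
          exact ⟨t4, rfl⟩

lemma scanB_nil : scanB [] = [] := by rw [scanB]

lemma scanB_cons (c : Char) (t : List Char) :
    scanB (c :: t) =
      if PySem.Chars.startswith (c :: t) ['s','a','i','n','t'] then
        ['s','t'] ++ scanB (t.drop 4)
      else if PySem.Chars.startswith (c :: t) ['n','y','c'] then
        ['n','e','w','y','o','r','k'] ++ scanB (t.drop 2)
      else if PySem.Chars.startswith (c :: t) ['n','y'] then
        ['n','e','w','y','o','r','k'] ++ scanB (t.drop 1)
      else if PySem.Chars.startswith (c :: t) ['m','o','u','n','t'] then
        ['m','t'] ++ scanB (t.drop 4)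
      else c :: scanB t := by rw [scanB]

lemma main_scan : ∀ n l, l.length ≤ n →
    scanB l = repP ['m','o','u','n','t'] ['m','t'] (repP ['n','y'] ['n','e','w','y','o','r','k'] (repP ['n','y','c'] ['n','e','w','y','o','r','k'] (repP ['s','a','i','n','t'] ['s','t'] (l)))) := by
  intro n
  induction n with
  | zero =>
    intro l hl
    have : l = [] := List.eq_nil_of_length_eq_zero (Nat.le_zero.mp hl)
    subst this
    simp [scanB_nil, repP_nil]
  | succ n ih =>
    intro l hl
    cases l with
    | nil => simp [scanB_nil, repP_nil]
    | cons c t =>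
      by_cases h1 : ['s','a','i','n','t'].isPrefixOf (c :: t) = true
      · -- "saint" fires
        obtain ⟨u, hu⟩ := List.isPrefixOf_iff_prefix.mp h1
        simp only [List.cons_append, List.nil_append] at hu
        obtain ⟨hc, ht⟩ := List.cons.inj hu
        subst hc; subst ht
        have a1 : repP ['s','a','i','n','t'] ['s','t'] ('s'::'a'::'i'::'n'::'t'::u) = 's'::'t'::repP ['s','a','i','n','t'] ['s','t'] (u) := by
          rw [show ('s'::'a'::'i'::'n'::'t'::u : List Char) = 's' :: (['a','i','n','t'] ++ u) from rfl,
            repP_fire]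
          simp
        have a2 : repP ['n','y','c'] ['n','e','w','y','o','r','k'] ('s'::'t'::repP ['s','a','i','n','t'] ['s','t'] (u)) = 's'::'t'::repP ['n','y','c'] ['n','e','w','y','o','r','k'] (repP ['s','a','i','n','t'] ['s','t'] (u)) := by
          rw [repP_pass1 _ _ _ _ _ (by decide), repP_pass1 _ _ _ _ _ (by decide)]
        have a3 : repP ['n','y'] ['n','e','w','y','o','r','k'] ('s'::'t'::repP ['n','y','c'] ['n','e','w','y','o','r','k'] (repP ['s','a','i','n','t'] ['s','t'] (u))) = 's'::'t'::repP ['n','y'] ['n','e','w','y','o','r','k'] (repP ['n','y','c'] ['n','e','w','y','o','r','k'] (repP ['s','a','i','n','t'] ['s','t'] (u))) := by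
          rw [repP_pass1 _ _ _ _ _ (by decide), repP_pass1 _ _ _ _ _ (by decide)]
        have a4 : repP ['m','o','u','n','t'] ['m','t'] ('s'::'t'::repP ['n','y'] ['n','e','w','y','o','r','k'] (repP ['n','y','c'] ['n','e','w','y','o','r','k'] (repP ['s','a','i','n','t'] ['s','t'] (u)))) = 's'::'t'::repP ['m','o','u','n','t'] ['m','t'] (repP ['n','y'] ['n','e','w','y','o','r','k'] (repP ['n','y','c'] ['n','e','w','y','o','r','k'] (repP ['s','a','i','n','t'] ['s','t'] (u)))) := by
          rw [repP_pass1 _ _ _ _ _ (by decide), repP_pass1 _ _ _ _ _ (by decide)]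
        rw [scanB_cons, if_pos (by simp [PySem.Chars.startswith, List.isPrefixOf]),
          show (('a'::'i'::'n'::'t'::u : List Char).drop 4) = u from rfl,
          a1, a2, a3, a4, ih u (by simp at hl; omega)]
        simp
      · by_cases h2 : ['n','y','c'].isPrefixOf (c :: t) = true
        · -- "nyc" fires
          obtain ⟨u, hu⟩ := List.isPrefixOf_iff_prefix.mp h2
          simp only [List.cons_append, List.nil_append] at hu
          obtain ⟨hc, ht⟩ := List.cons.inj hu
          subst hc; subst ht
          have a1 : repP ['s','a','i','n','t'] ['s','t'] ('n'::'y'::'c'::u) = 'n'::'y'::'c'::repP ['s','a','i','n','t'] ['s','t'] (u) := by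
            rw [repP_pass1 _ _ _ _ _ (by decide), repP_pass1 _ _ _ _ _ (by decide),
              repP_pass1 _ _ _ _ _ (by decide)]
          have a2 : repP ['n','y','c'] ['n','e','w','y','o','r','k'] ('n'::'y'::'c'::repP ['s','a','i','n','t'] ['s','t'] (u)) = 'n'::'e'::'w'::'y'::'o'::'r'::'k'::repP ['n','y','c'] ['n','e','w','y','o','r','k'] (repP ['s','a','i','n','t'] ['s','t'] (u)) := by
            rw [show ('n'::'y'::'c'::repP ['s','a','i','n','t'] ['s','t'] (u) : List Char)
                = 'n' :: (['y','c'] ++ repP ['s','a','i','n','t'] ['s','t'] (u)) from rfl, repP_fire]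
            simp
          have a3 : repP ['n','y'] ['n','e','w','y','o','r','k'] ('n'::'e'::'w'::'y'::'o'::'r'::'k'::repP ['n','y','c'] ['n','e','w','y','o','r','k'] (repP ['s','a','i','n','t'] ['s','t'] (u))) = 'n'::'e'::'w'::'y'::'o'::'r'::'k'::repP ['n','y'] ['n','e','w','y','o','r','k'] (repP ['n','y','c'] ['n','e','w','y','o','r','k'] (repP ['s','a','i','n','t'] ['s','t'] (u))) := by
            rw [repP_pass2 _ _ _ _ _ _ _ (by decide), repP_pass1 _ _ _ _ _ (by decide),
              repP_pass1 _ _ _ _ _ (by decide), repP_pass1 _ _ _ _ _ (by decide),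
              repP_pass1 _ _ _ _ _ (by decide), repP_pass1 _ _ _ _ _ (by decide),
              repP_pass1 _ _ _ _ _ (by decide)]
          have a4 : repP ['m','o','u','n','t'] ['m','t'] ('n'::'e'::'w'::'y'::'o'::'r'::'k'::repP ['n','y'] ['n','e','w','y','o','r','k'] (repP ['n','y','c'] ['n','e','w','y','o','r','k'] (repP ['s','a','i','n','t'] ['s','t'] (u)))) = 'n'::'e'::'w'::'y'::'o'::'r'::'k'::repP ['m','o','u','n','t'] ['m','t'] (repP ['n','y'] ['n','e','w','y','o','r','k'] (repP ['n','y','c'] ['n','e','w','y','o','r','k'] (repP ['s','a','i','n','t'] ['s','t'] (u)))) := by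
            rw [repP_pass1 _ _ _ _ _ (by decide), repP_pass1 _ _ _ _ _ (by decide),
              repP_pass1 _ _ _ _ _ (by decide), repP_pass1 _ _ _ _ _ (by decide),
              repP_pass1 _ _ _ _ _ (by decide), repP_pass1 _ _ _ _ _ (by decide),
              repP_pass1 _ _ _ _ _ (by decide)]
          rw [scanB_cons, if_neg (by simp [PySem.Chars.startswith]),
            if_pos (by simp [PySem.Chars.startswith, List.isPrefixOf]),
            show (('y'::'c'::u : List Char).drop 2) = u from rfl,
            a1, a2, a3, a4, ih u (by simp at hl; omega)]
          simp
        · by_cases h3 : ['n','y'].isPrefixOf (c :: t) = true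
          · -- "ny" fires (next char is not 'c')
            obtain ⟨u, hu⟩ := List.isPrefixOf_iff_prefix.mp h3
            simp only [List.cons_append, List.nil_append] at hu
            obtain ⟨hc, ht⟩ := List.cons.inj hu
            subst hc; subst ht
            have hu_c : u.head? ≠ some 'c' := by
              intro hh
              cases u with
              | nil => simp at hh
              | cons a u' =>
                simp at hh
                subst hh
                exact h2 (by simp [List.isPrefixOf])
            have hr1_c : (repP ['s','a','i','n','t'] ['s','t'] (u)).head? ≠ some 'c' := by
              intro hh
              cases hr : repP ['s','a','i','n','t'] ['s','t'] (u) with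
              | nil => rw [hr] at hh; simp at hh
              | cons a z =>
                rw [hr] at hh
                simp at hh
                subst hh
                obtain ⟨u', rfl, _⟩ := peel1 'c' (by decide) u z hr
                exact hu_c rfl
            have a1 : repP ['s','a','i','n','t'] ['s','t'] ('n'::'y'::u) = 'n'::'y'::repP ['s','a','i','n','t'] ['s','t'] (u) := by
              rw [repP_pass1 _ _ _ _ _ (by decide), repP_pass1 _ _ _ _ _ (by decide)]
            have a2 : repP ['n','y','c'] ['n','e','w','y','o','r','k'] ('n'::'y'::repP ['s','a','i','n','t'] ['s','t'] (u)) = 'n'::'y'::repP ['n','y','c'] ['n','e','w','y','o','r','k'] (repP ['s','a','i','n','t'] ['s','t'] (u)) := by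
              rw [repP_pass3 _ _ _ _ _ _ _ _ hr1_c, repP_pass1 _ _ _ _ _ (by decide)]
            have a3 : repP ['n','y'] ['n','e','w','y','o','r','k'] ('n'::'y'::repP ['n','y','c'] ['n','e','w','y','o','r','k'] (repP ['s','a','i','n','t'] ['s','t'] (u))) = 'n'::'e'::'w'::'y'::'o'::'r'::'k'::repP ['n','y'] ['n','e','w','y','o','r','k'] (repP ['n','y','c'] ['n','e','w','y','o','r','k'] (repP ['s','a','i','n','t'] ['s','t'] (u))) := by
              rw [show ('n'::'y'::repP ['n','y','c'] ['n','e','w','y','o','r','k'] (repP ['s','a','i','n','t'] ['s','t'] (u)) : List Char)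
                  = 'n' :: (['y'] ++ repP ['n','y','c'] ['n','e','w','y','o','r','k'] (repP ['s','a','i','n','t'] ['s','t'] (u))) from rfl, repP_fire]
              simp
            have a4 : repP ['m','o','u','n','t'] ['m','t'] ('n'::'e'::'w'::'y'::'o'::'r'::'k'::repP ['n','y'] ['n','e','w','y','o','r','k'] (repP ['n','y','c'] ['n','e','w','y','o','r','k'] (repP ['s','a','i','n','t'] ['s','t'] (u)))) = 'n'::'e'::'w'::'y'::'o'::'r'::'k'::repP ['m','o','u','n','t'] ['m','t'] (repP ['n','y'] ['n','e','w','y','o','r','k'] (repP ['n','y','c'] ['n','e','w','y','o','r','k'] (repP ['s','a','i','n','t'] ['s','t'] (u)))) := by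
              rw [repP_pass1 _ _ _ _ _ (by decide), repP_pass1 _ _ _ _ _ (by decide),
                repP_pass1 _ _ _ _ _ (by decide), repP_pass1 _ _ _ _ _ (by decide),
                repP_pass1 _ _ _ _ _ (by decide), repP_pass1 _ _ _ _ _ (by decide),
                repP_pass1 _ _ _ _ _ (by decide)]
            rw [scanB_cons, if_neg (by simp [PySem.Chars.startswith]),
              if_neg (by simpa [PySem.Chars.startswith] using h2),
              if_pos (by simp [PySem.Chars.startswith, List.isPrefixOf]),
              show (('y'::u : List Char).drop 1) = u from rfl,
              a1, a2, a3, a4, ih u (by simp at hl; omega)]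
            simp
          · by_cases h4 : ['m','o','u','n','t'].isPrefixOf (c :: t) = true
            · -- "mount" fires
              obtain ⟨u, hu⟩ := List.isPrefixOf_iff_prefix.mp h4
              simp only [List.cons_append, List.nil_append] at hu
              obtain ⟨hc, ht⟩ := List.cons.inj hu
              subst hc; subst ht
              have a1 : repP ['s','a','i','n','t'] ['s','t'] ('m'::'o'::'u'::'n'::'t'::u) = 'm'::'o'::'u'::'n'::'t'::repP ['s','a','i','n','t'] ['s','t'] (u) := by
                rw [repP_pass1 _ _ _ _ _ (by decide), repP_pass1 _ _ _ _ _ (by decide),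
                  repP_pass1 _ _ _ _ _ (by decide), repP_pass1 _ _ _ _ _ (by decide),
                  repP_pass1 _ _ _ _ _ (by decide)]
              have a2 : repP ['n','y','c'] ['n','e','w','y','o','r','k'] ('m'::'o'::'u'::'n'::'t'::repP ['s','a','i','n','t'] ['s','t'] (u)) = 'm'::'o'::'u'::'n'::'t'::repP ['n','y','c'] ['n','e','w','y','o','r','k'] (repP ['s','a','i','n','t'] ['s','t'] (u)) := by
                rw [repP_pass1 _ _ _ _ _ (by decide), repP_pass1 _ _ _ _ _ (by decide),
                  repP_pass1 _ _ _ _ _ (by decide), repP_pass2 _ _ _ _ _ _ _ (by decide),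
                  repP_pass1 _ _ _ _ _ (by decide)]
              have a3 : repP ['n','y'] ['n','e','w','y','o','r','k'] ('m'::'o'::'u'::'n'::'t'::repP ['n','y','c'] ['n','e','w','y','o','r','k'] (repP ['s','a','i','n','t'] ['s','t'] (u))) = 'm'::'o'::'u'::'n'::'t'::repP ['n','y'] ['n','e','w','y','o','r','k'] (repP ['n','y','c'] ['n','e','w','y','o','r','k'] (repP ['s','a','i','n','t'] ['s','t'] (u))) := by
                rw [repP_pass1 _ _ _ _ _ (by decide), repP_pass1 _ _ _ _ _ (by decide),
                  repP_pass1 _ _ _ _ _ (by decide), repP_pass2 _ _ _ _ _ _ _ (by decide),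
                  repP_pass1 _ _ _ _ _ (by decide)]
              have a4 : repP ['m','o','u','n','t'] ['m','t'] ('m'::'o'::'u'::'n'::'t'::repP ['n','y'] ['n','e','w','y','o','r','k'] (repP ['n','y','c'] ['n','e','w','y','o','r','k'] (repP ['s','a','i','n','t'] ['s','t'] (u)))) = 'm'::'t'::repP ['m','o','u','n','t'] ['m','t'] (repP ['n','y'] ['n','e','w','y','o','r','k'] (repP ['n','y','c'] ['n','e','w','y','o','r','k'] (repP ['s','a','i','n','t'] ['s','t'] (u)))) := by
                rw [show ('m'::'o'::'u'::'n'::'t'::repP ['n','y'] ['n','e','w','y','o','r','k'] (repP ['n','y','c'] ['n','e','w','y','o','r','k'] (repP ['s','a','i','n','t'] ['s','t'] (u))) : List Char)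
                    = 'm' :: (['o','u','n','t'] ++ repP ['n','y'] ['n','e','w','y','o','r','k'] (repP ['n','y','c'] ['n','e','w','y','o','r','k'] (repP ['s','a','i','n','t'] ['s','t'] (u)))) from rfl, repP_fire]
                simp
              rw [scanB_cons, if_neg (by simp [PySem.Chars.startswith]),
                if_neg (by simp [PySem.Chars.startswith]),
                if_neg (by simp [PySem.Chars.startswith]),
                if_pos (by simp [PySem.Chars.startswith, List.isPrefixOf]),
                show (('o'::'u'::'n'::'t'::u : List Char).drop 4) = u from rfl,
                a1, a2, a3, a4, ih u (by simp at hl; omega)]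
              simp
            · -- no key fires at this position
              have e1 : repP ['s','a','i','n','t'] ['s','t'] (c :: t) = c :: repP ['s','a','i','n','t'] ['s','t'] (t) := by
                rw [repP_cons, if_neg h1]
              have e2 : repP ['n','y','c'] ['n','e','w','y','o','r','k'] (c :: repP ['s','a','i','n','t'] ['s','t'] (t)) = c :: repP ['n','y','c'] ['n','e','w','y','o','r','k'] (repP ['s','a','i','n','t'] ['s','t'] (t)) := by
                rw [repP_cons, if_neg]
                intro hp
                obtain ⟨w, hw⟩ := List.isPrefixOf_iff_prefix.mp hp
                simp only [List.cons_append, List.nil_append] at hw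
                obtain ⟨hc, hrest⟩ := List.cons.inj hw
                subst hc
                obtain ⟨t1, rfl, hz⟩ := peel1 'y' (by decide) t _ hrest.symm
                obtain ⟨t2, rfl, _⟩ := peel1 'c' (by decide) t1 _ hz.symm
                exact h2 (by simp [List.isPrefixOf])
              have e3 : repP ['n','y'] ['n','e','w','y','o','r','k'] (c :: repP ['n','y','c'] ['n','e','w','y','o','r','k'] (repP ['s','a','i','n','t'] ['s','t'] (t))) = c :: repP ['n','y'] ['n','e','w','y','o','r','k'] (repP ['n','y','c'] ['n','e','w','y','o','r','k'] (repP ['s','a','i','n','t'] ['s','t'] (t))) := by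
                rw [repP_cons, if_neg]
                intro hp
                obtain ⟨w, hw⟩ := List.isPrefixOf_iff_prefix.mp hp
                simp only [List.cons_append, List.nil_append] at hw
                obtain ⟨hc, hrest⟩ := List.cons.inj hw
                subst hc
                obtain ⟨t1, rfl, _⟩ := peel2 'y' (by decide) (by decide) t _ hrest.symm
                exact h3 (by simp [List.isPrefixOf])
              have e4 : repP ['m','o','u','n','t'] ['m','t'] (c :: repP ['n','y'] ['n','e','w','y','o','r','k'] (repP ['n','y','c'] ['n','e','w','y','o','r','k'] (repP ['s','a','i','n','t'] ['s','t'] (t)))) = c :: repP ['m','o','u','n','t'] ['m','t'] (repP ['n','y'] ['n','e','w','y','o','r','k'] (repP ['n','y','c'] ['n','e','w','y','o','r','k'] (repP ['s','a','i','n','t'] ['s','t'] (t)))) := by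
                rw [repP_cons, if_neg]
                intro hp
                obtain ⟨w, hw⟩ := List.isPrefixOf_iff_prefix.mp hp
                simp only [List.cons_append, List.nil_append] at hw
                obtain ⟨hc, hrest⟩ := List.cons.inj hw
                subst hc
                obtain ⟨u, rfl⟩ := ount t w hrest.symm
                exact h4 (by simp [List.isPrefixOf])
              rw [scanB_cons, if_neg (by simpa [PySem.Chars.startswith] using h1),
                if_neg (by simpa [PySem.Chars.startswith] using h2),
                if_neg (by simpa [PySem.Chars.startswith] using h3),
                if_neg (by simpa [PySem.Chars.startswith] using h4),
                e1, e2, e3, e4, ih t (by simp at hl; omega)]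

-- ===== VERDICT (by name: the statement is the Claim_ definition above) =====
set_option maxHeartbeats 1000000 in
theorem city_change_spec : Claim_equal_city_change := by
  intro sen _
  unfold Spec_city_change
  have hA : city_change sen
      = (fun s => if PySem.Str.isIn "mount" s then PySem.Str.replace s "mount" "mt" else s)
        ((fun s => if PySem.Str.isIn "ny" s then PySem.Str.replace s "ny" "newyork" else s)
        ((fun s => if PySem.Str.isIn "nyc" s then PySem.Str.replace s "nyc" "newyork" else s)
        ((fun s => if PySem.Str.isIn "saint" s then PySem.Str.replace s "saint" "st" else s)
          sen))) := by
    have hk : (PySem.Dict.ofList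
        [("saint","st"),("nyc","newyork"),("ny","newyork"),("mount","mt")]
        : PySem.Dict String String).keys = ["saint","nyc","ny","mount"] := by decide
    have g1 : ((PySem.Dict.ofList
        [("saint","st"),("nyc","newyork"),("ny","newyork"),("mount","mt")]
        : PySem.Dict String String).get? "saint").getD "" = "st" := by decide
    have g2 : ((PySem.Dict.ofList
        [("saint","st"),("nyc","newyork"),("ny","newyork"),("mount","mt")]
        : PySem.Dict String String).get? "nyc").getD "" = "newyork" := by decide
    have g3 : ((PySem.Dict.ofList
        [("saint","st"),("nyc","newyork"),("ny","newyork"),("mount","mt")]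
        : PySem.Dict String String).get? "ny").getD "" = "newyork" := by decide
    have g4 : ((PySem.Dict.ofList
        [("saint","st"),("nyc","newyork"),("ny","newyork"),("mount","mt")]
        : PySem.Dict String String).get? "mount").getD "" = "mt" := by decide
    simp only [city_change]
    rw [hk]
    simp only [List.foldl]
    rw [g1, g2, g3, g4]
  have key : (city_change sen).toList = scanB sen.toList := by
    rw [hA]
    simp only [step_toList "mount" "mt" (by decide), step_toList "ny" "newyork" (by decide),
      step_toList "nyc" "newyork" (by decide), step_toList "saint" "st" (by decide)]
    simp only [show ("mount" : String).toList = ['m','o','u','n','t'] from rfl,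
      show ("mt" : String).toList = ['m','t'] from rfl,
      show ("ny" : String).toList = ['n','y'] from rfl,
      show ("nyc" : String).toList = ['n','y','c'] from rfl,
      show ("newyork" : String).toList = ['n','e','w','y','o','r','k'] from rfl,
      show ("saint" : String).toList = ['s','a','i','n','t'] from rfl,
      show ("st" : String).toList = ['s','t'] from rfl]
    rw [main_scan sen.toList.length sen.toList (le_refl _)]
  calc city_change sen
      = String.ofList (city_change sen).toList := String.ofList_toList.symm
    _ = String.ofList (scanB sen.toList) := by rw [key]
    _ = city_change_alt sen := rfl
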